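-- pv_equiv track=rewrite | github.com/peteromallet/VibeComfy | cli_tools/analysis.py | categorize_pipeline
-- ===== SOURCE A (Python) =====
-- from typing import Dict, List, Set, Tuple, Optional, Any
--
-- def categorize_pipeline(dtypes: List[str]) -> str:
--     """Categorize a pipeline based on the data types it uses."""
--     dtype_set = set(d.upper() for d in dtypes if d)
--
--     if 'WANVIDEOVACE' in dtype_set or any('VACE' in d for d in dtype_set):
--         return 'VACE'
--     if 'LATENT' in dtype_set:
--         return 'Latent'
--     if 'IMAGE' in dtype_set:
--         return 'Image'
--     if 'VIDEO' in dtype_set: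
--         return 'Video'
--     return 'Mixed'
-- ===== SOURCE B (Python) =====
-- def _rank(d):
--     """Priority ordinal of a single dtype: 0=VACE, 1=Latent, 2=Image, 3=Video, 4=no category."""
--     if not d:
--         return 4
--     u = d.upper()
--     if 'VACE' in u:
--         return 0
--     if u == 'LATENT':
--         return 1
--     if u == 'IMAGE':
--         return 2
--     if u == 'VIDEO':
--         return 3
--     return 4
--
--
-- def categorize_pipeline(dtypes):
--     """Categorize a pipeline based on the data types it uses."""
--     best = min((_rank(d) for d in dtypes), default=4)
--     return ['VACE', 'Latent', 'Image', 'Video', 'Mixed'][best]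
-- ===== Notes on version B (the rewrite author's own statement) =====
-- stated objective: alternative
-- what changed: B maps each dtype to a priority ordinal (0=VACE,...,4=none), reduces with min (default 4), and indexes a category table, instead of building an upper-cased set and testing four memberships in sequence.
import Mathlib
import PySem

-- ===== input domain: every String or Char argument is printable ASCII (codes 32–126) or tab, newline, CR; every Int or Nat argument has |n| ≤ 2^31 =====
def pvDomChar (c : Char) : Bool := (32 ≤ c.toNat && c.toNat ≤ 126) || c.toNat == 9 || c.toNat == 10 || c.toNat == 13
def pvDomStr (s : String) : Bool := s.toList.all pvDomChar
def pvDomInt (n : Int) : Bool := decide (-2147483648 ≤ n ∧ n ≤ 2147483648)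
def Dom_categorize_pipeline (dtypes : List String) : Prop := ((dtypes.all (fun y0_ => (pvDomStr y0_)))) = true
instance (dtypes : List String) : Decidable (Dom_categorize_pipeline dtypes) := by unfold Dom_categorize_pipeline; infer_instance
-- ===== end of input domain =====

-- B replaces A's set-build plus four sequenced membership checks by a per-dtype priority ordinal, a min-reduction and a table lookup: an alternative algorithm, same cost.

-- ===== PORT A =====
def categorize_pipeline (dtypes : List String) : String :=
  let dtype_set : PySem.Set String :=
    PySem.Set.ofList ((dtypes.filter (fun d => d != "")).map PySem.Str.upper)
  if PySem.Set.contains dtype_set "WANVIDEOVACE"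
      || dtype_set.any (fun d => PySem.Str.isIn "VACE" d) then "VACE"
  else if PySem.Set.contains dtype_set "LATENT" then "Latent"
  else if PySem.Set.contains dtype_set "IMAGE" then "Image"
  else if PySem.Set.contains dtype_set "VIDEO" then "Video"
  else "Mixed"

-- ===== PORT B =====
-- helper _rank from Source B
def pvRank (d : String) : Int :=
  if d == "" then 4
  else
    let u := PySem.Str.upper d
    if PySem.Str.isIn "VACE" u then 0
    else if u == "LATENT" then 1
    else if u == "IMAGE" then 2
    else if u == "VIDEO" then 3
    else 4

def categorize_pipeline_alt (dtypes : List String) : String :=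
  let best := PySem.List.minD (dtypes.map pvRank) (fun x => x) 4
  -- 0 ≤ best ≤ 4 always, so the Python indexing never raises; the getD "" branch is unreachable
  (PySem.List.pyGet? ["VACE", "Latent", "Image", "Video", "Mixed"] best).getD ""

-- ===== PRECONDITION & SPEC =====
def Spec_categorize_pipeline (dtypes : List String) (out : String) : Prop := out = categorize_pipeline_alt dtypes
instance (dtypes : List String) (out : String) : Decidable (Spec_categorize_pipeline dtypes out) := by unfold Spec_categorize_pipeline; infer_instance

-- ===== CLAIM (what is proved, stated in full; the proofs are below) =====
def Claim_equal_categorize_pipeline : Prop := ∀ (dtypes : List String), Dom_categorize_pipeline dtypes → Spec_categorize_pipeline dtypes (categorize_pipeline dtypes)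

-- ===== LEMMAS AND PROOFS =====

theorem pvRank_cases (d : String) :
    pvRank d = 0 ∨ pvRank d = 1 ∨ pvRank d = 2 ∨ pvRank d = 3 ∨ pvRank d = 4 := by
  unfold pvRank
  by_cases h0 : d == ""
  · simp [h0]
  · simp only [h0, if_false]
    by_cases h1 : PySem.Str.isIn "VACE" (PySem.Str.upper d) <;>
    by_cases h2 : PySem.Str.upper d == "LATENT" <;>
    by_cases h3 : PySem.Str.upper d == "IMAGE" <;>
    by_cases h4 : PySem.Str.upper d == "VIDEO" <;>
      simp_all <;> decide

theorem rank0_iff (d : String) :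
    (pvRank d == 0) = true ↔ d ≠ "" ∧ PySem.Str.isIn "VACE" (PySem.Str.upper d) = true := by
  unfold pvRank
  by_cases h0 : d == ""
  · simp_all
  · simp only [h0, if_false]
    by_cases h1 : PySem.Str.isIn "VACE" (PySem.Str.upper d) <;>
    by_cases h2 : PySem.Str.upper d == "LATENT" <;>
    by_cases h3 : PySem.Str.upper d == "IMAGE" <;>
    by_cases h4 : PySem.Str.upper d == "VIDEO" <;>
      simp_all <;> decide

theorem rank1_iff (d : String) :
    (pvRank d == 1) = true ↔ d ≠ "" ∧ (PySem.Str.upper d == "LATENT") = true := by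
  unfold pvRank
  by_cases h0 : d == ""
  · simp_all
  · simp only [h0, if_false]
    by_cases h1 : PySem.Str.isIn "VACE" (PySem.Str.upper d) <;>
    by_cases h2 : PySem.Str.upper d == "LATENT" <;>
    by_cases h3 : PySem.Str.upper d == "IMAGE" <;>
    by_cases h4 : PySem.Str.upper d == "VIDEO" <;>
      simp_all <;> decide

theorem rank2_iff (d : String) :
    (pvRank d == 2) = true ↔ d ≠ "" ∧ (PySem.Str.upper d == "IMAGE") = true := by
  unfold pvRank
  by_cases h0 : d == ""
  · simp_all
  · simp only [h0, if_false]
    by_cases h1 : PySem.Str.isIn "VACE" (PySem.Str.upper d) <;>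
    by_cases h2 : PySem.Str.upper d == "LATENT" <;>
    by_cases h3 : PySem.Str.upper d == "IMAGE" <;>
    by_cases h4 : PySem.Str.upper d == "VIDEO" <;>
      simp_all <;> decide

theorem rank3_iff (d : String) :
    (pvRank d == 3) = true ↔ d ≠ "" ∧ (PySem.Str.upper d == "VIDEO") = true := by
  unfold pvRank
  by_cases h0 : d == ""
  · simp_all
  · simp only [h0, if_false]
    by_cases h1 : PySem.Str.isIn "VACE" (PySem.Str.upper d) <;>
    by_cases h2 : PySem.Str.upper d == "LATENT" <;>
    by_cases h3 : PySem.Str.upper d == "IMAGE" <;>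
    by_cases h4 : PySem.Str.upper d == "VIDEO" <;>
      simp_all <;> decide

-- the nested-ite form of the minimum rank of a list
def pvMinRank (l : List String) : Int :=
  if l.any (fun d => pvRank d == 0) then 0
  else if l.any (fun d => pvRank d == 1) then 1
  else if l.any (fun d => pvRank d == 2) then 2
  else if l.any (fun d => pvRank d == 3) then 3
  else 4

theorem pvMinRank_bounds (l : List String) : 0 ≤ pvMinRank l ∧ pvMinRank l ≤ 4 := by
  unfold pvMinRank; split_ifs <;> omega

theorem pvMinRank_cons (d : String) (rest : List String) :
    pvMinRank (d :: rest) = min (pvRank d) (pvMinRank rest) := by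
  have hb := pvMinRank_bounds rest
  rcases pvRank_cases d with h | h | h | h | h <;>
    (unfold pvMinRank at *; simp only [List.any_cons, h]; norm_num; split_ifs <;> omega)

-- the running min over ranks computes pvMinRank
theorem foldl_min_rank (l : List String) (a : Int) (h0 : 0 ≤ a) (h4 : a ≤ 4) :
    (l.map pvRank).foldl min a = min a (pvMinRank l) := by
  induction l generalizing a with
  | nil =>
    simp only [List.map_nil, List.foldl_nil, pvMinRank, List.any_nil]
    simp; omega
  | cons d rest ih =>
    have hd := pvRank_cases d
    have hbr := pvMinRank_bounds rest
    have ih' := ih (min a (pvRank d)) (by omega) (by omega)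
    simp only [List.map_cons, List.foldl_cons]
    rw [ih', pvMinRank_cons]
    omega

-- B's min(..., default=4) computes pvMinRank
theorem minD_rank (l : List String) :
    PySem.List.minD (l.map pvRank) (fun x => x) 4 = pvMinRank l := by
  cases l with
  | nil => simp [PySem.List.minD, PySem.List.min?, pvMinRank]
  | cons d rest =>
    have hd := pvRank_cases d
    have hbr := pvMinRank_bounds rest
    have hfold := foldl_min_rank rest (pvRank d) (by omega) (by omega)
    have hmd : PySem.List.minD ((d :: rest).map pvRank) (fun x => x) 4
        = (rest.map pvRank).foldl min (pvRank d) := by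
      simp [PySem.List.minD, List.map_cons, PySem.List.min?_id_cons]
    rw [hmd, hfold, pvMinRank_cons]

-- Membership in A's upper-cased set ↔ some nonempty dtype uppercases to x.
theorem mem_dtype_set (dtypes : List String) (x : String) :
    x ∈ PySem.Set.ofList ((dtypes.filter (fun d => d != "")).map PySem.Str.upper)
      ↔ ∃ d ∈ dtypes, d ≠ "" ∧ PySem.Str.upper d = x := by
  rw [PySem.Set.mem_ofList]
  simp [List.mem_map, List.mem_filter, and_assoc]

-- A's VACE condition ↔ "some dtype has rank 0".
theorem vace_cond_iff (dtypes : List String) :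
    (PySem.Set.contains (PySem.Set.ofList ((dtypes.filter (fun d => d != "")).map PySem.Str.upper)) "WANVIDEOVACE"
      || (PySem.Set.ofList ((dtypes.filter (fun d => d != "")).map PySem.Str.upper)).any
            (fun d => PySem.Str.isIn "VACE" d)) = true
      ↔ dtypes.any (fun d => pvRank d == 0) = true := by
  rw [Bool.or_eq_true, PySem.Set.contains_iff]
  simp only [List.any_eq_true, rank0_iff]
  constructor
  · rintro (h | ⟨u, hu, hv⟩)
    · obtain ⟨d, hd, hne, hup⟩ := (mem_dtype_set _ _).1 h
      exact ⟨d, hd, hne, by rw [hup]; decide⟩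
    · obtain ⟨d, hd, hne, hup⟩ := (mem_dtype_set _ _).1 hu
      exact ⟨d, hd, hne, hup ▸ hv⟩
  · rintro ⟨d, hd, hne, hv⟩
    by_cases hmem : PySem.Str.upper d ∈ PySem.Set.ofList ((dtypes.filter (fun d => d != "")).map PySem.Str.upper)
    · exact Or.inr ⟨_, hmem, hv⟩
    · exact absurd ((mem_dtype_set _ _).2 ⟨d, hd, hne, rfl⟩) hmem

-- A's exact-membership conditions ↔ "some dtype has rank k".
theorem exact_cond_iff (dtypes : List String) (k : Int) (x : String)
    (hk : ∀ d : String, (pvRank d == k) = true ↔ d ≠ "" ∧ (PySem.Str.upper d == x) = true) :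
    PySem.Set.contains (PySem.Set.ofList ((dtypes.filter (fun d => d != "")).map PySem.Str.upper)) x = true
      ↔ dtypes.any (fun d => pvRank d == k) = true := by
  rw [PySem.Set.contains_iff, mem_dtype_set]
  simp only [List.any_eq_true, hk]
  simp

-- ===== VERDICT (by name: the statement is the Claim_ definition above) =====
theorem categorize_pipeline_spec : Claim_equal_categorize_pipeline := by
  intro dtypes _
  unfold Spec_categorize_pipeline
  simp only [categorize_pipeline, categorize_pipeline_alt]
  rw [minD_rank]
  unfold pvMinRank
  by_cases h0 : dtypes.any (fun d => pvRank d == 0) = true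
  · rw [if_pos ((vace_cond_iff dtypes).2 h0), if_pos h0]; rfl
  · rw [if_neg (fun hc => h0 ((vace_cond_iff dtypes).1 hc)), if_neg h0]
    by_cases h1 : dtypes.any (fun d => pvRank d == 1) = true
    · rw [if_pos ((exact_cond_iff dtypes 1 "LATENT" rank1_iff).2 h1), if_pos h1]; rfl
    · rw [if_neg (fun hc => h1 ((exact_cond_iff dtypes 1 "LATENT" rank1_iff).1 hc)), if_neg h1]
      by_cases h2 : dtypes.any (fun d => pvRank d == 2) = true
      · rw [if_pos ((exact_cond_iff dtypes 2 "IMAGE" rank2_iff).2 h2), if_pos h2]; rfl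
      · rw [if_neg (fun hc => h2 ((exact_cond_iff dtypes 2 "IMAGE" rank2_iff).1 hc)), if_neg h2]
        by_cases h3 : dtypes.any (fun d => pvRank d == 3) = true
        · rw [if_pos ((exact_cond_iff dtypes 3 "VIDEO" rank3_iff).2 h3), if_pos h3]; rfl
        · rw [if_neg (fun hc => h3 ((exact_cond_iff dtypes 3 "VIDEO" rank3_iff).1 hc)), if_neg h3]; rfl
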